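-- pv_equiv track=rewrite | github.com/yxq9710/bilstm_crf | dataset/bilstm_crf.py | count_target
-- ===== SOURCE A (Python) =====
-- def count_target(out_i):
--     count = 0
--     length = len(out_i)
--     i = 0
--     target = []
--     while i < length:
--         if out_i[i] != 0:
--             j = i
--             target.append(out_i[i])
--             count += 1
--             while out_i[j] != 0:
--                 j += 1
--                 if j == length:
--                     return count, target
--             i = j
--         i += 1
--     return count, target
-- ===== SOURCE B (Python) =====
-- def count_target(out_i):
--     # A run of nonzeros starts exactly where the element is nonzero and its
--     # predecessor (0 for the first position) is zero; collect those starts.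
--     target = [b for a, b in zip([0] + list(out_i), out_i) if b != 0 and a == 0]
--     return len(target), target
-- ===== Notes on version B (the rewrite author's own statement) =====
-- stated objective: simpler
-- what changed: Replaced the nested index-skipping while loops with a single comprehension over the list zipped against itself shifted by one position, keeping exactly the elements that are nonzero with a zero predecessor (the run starts); the count is just the length of that list.
import Mathlib
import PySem

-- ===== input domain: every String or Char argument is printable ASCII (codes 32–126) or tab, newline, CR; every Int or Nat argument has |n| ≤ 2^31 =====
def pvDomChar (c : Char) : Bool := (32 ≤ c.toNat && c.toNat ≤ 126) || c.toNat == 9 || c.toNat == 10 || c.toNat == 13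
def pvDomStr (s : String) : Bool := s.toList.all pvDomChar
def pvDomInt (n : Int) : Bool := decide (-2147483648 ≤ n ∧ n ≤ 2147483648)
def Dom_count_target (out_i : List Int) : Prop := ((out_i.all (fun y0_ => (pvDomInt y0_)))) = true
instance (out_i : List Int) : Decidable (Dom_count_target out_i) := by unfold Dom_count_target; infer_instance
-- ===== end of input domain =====

-- B replaces A's nested index-skipping loops by one predecessor-comparison comprehension (simpler, same O(n) cost).

-- ===== PORT A =====
-- A's indices are always nonnegative and in range where dereferenced, so pyGetD is exact for out_i[i]/out_i[j]
theorem pv_getD_ne_lt (xs : List Int) (j : Nat) (h : PySem.List.pyGetD xs (j : Int) 0 ≠ 0) : j < xs.length := by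
  by_contra hj
  simp [PySem.List.pyGetD_natCast, List.getD_eq_getElem?_getD, List.getElem?_eq_none (by omega : xs.length ≤ j)] at h

-- inner loop 'while out_i[j] != 0: j += 1; if j == length: return count, target' ('none' = that early return)
def aInner (xs : List Int) (j : Nat) : Option Nat :=
  if PySem.List.pyGetD xs (j : Int) 0 ≠ 0 then
    if j + 1 = xs.length then none else aInner xs (j + 1)
  else some j
termination_by xs.length - j
decreasing_by
  have := pv_getD_ne_lt xs j (by assumption)
  omega

theorem aInner_ge (xs : List Int) (j : Nat) (k : Nat) (h : aInner xs j = some k) : j ≤ k := by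
  induction j using aInner.induct xs with
  | case1 j h1 h2 => rw [aInner, if_pos h1, if_pos h2] at h; cases h
  | case2 j h1 h2 ih =>
      rw [aInner, if_pos h1, if_neg h2] at h
      have := ih h; omega
  | case3 j h1 =>
      rw [aInner, if_neg h1] at h
      cases h; exact le_refl _

-- outer 'while i < length' loop, carrying count and target
def aOuter (xs : List Int) (i : Nat) (count : Int) (target : List Int) : Int × List Int :=
  if i < xs.length then
    if PySem.List.pyGetD xs (i : Int) 0 ≠ 0 then
      let target' := target ++ [PySem.List.pyGetD xs (i : Int) 0]
      let count' := count + 1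
      match h : aInner xs i with
      | none => (count', target')
      | some j => aOuter xs (j + 1) count' target'   -- i = j; i += 1
    else aOuter xs (i + 1) count target
  else (count, target)
termination_by xs.length - i
decreasing_by
  · have := aInner_ge xs i _ h
    omega
  · omega

def count_target (out_i : List Int) : Int × List Int := aOuter out_i 0 0 []

-- ===== PORT B =====
def count_target_alt (out_i : List Int) : Int × List Int :=
  let target := (((0 : Int) :: out_i).zip out_i).filter
      (fun ab => ab.2 != 0 && ab.1 == 0) |>.map (fun ab => ab.2)
  ((target.length : Int), target)

-- ===== PRECONDITION & SPEC =====
def Spec_count_target (out_i : List Int) (out : Int × List Int) : Prop := out = count_target_alt out_i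
instance (out_i : List Int) (out : Int × List Int) : Decidable (Spec_count_target out_i out) := by unfold Spec_count_target; infer_instance

-- ===== CLAIM (what is proved, stated in full; the proofs are below) =====
def Claim_equal_count_target : Prop := ∀ (out_i : List Int), Dom_count_target out_i → Spec_count_target out_i (count_target out_i)

-- ===== LEMMAS AND PROOFS =====

-- run-start collector: element kept iff it is nonzero and the previous one is zero
def bGo (prev : Int) : List Int → List Int
  | [] => []
  | x :: xs => (if x != 0 && prev == 0 then [x] else []) ++ bGo x xs

theorem bGo_eq_filter (prev : Int) (xs : List Int) :
    (((prev :: xs).zip xs).filter (fun ab => ab.2 != 0 && ab.1 == 0)).map (fun ab => ab.2)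
      = bGo prev xs := by
  induction xs generalizing prev with
  | nil => simp [bGo]
  | cons x xs ih =>
      simp only [List.zip_cons_cons, List.filter_cons, bGo]
      by_cases h : (x != 0 && prev == 0) = true <;> simp [h, ih x]

theorem bGo_nonzero (prev : Int) (xs : List Int) (h : prev ≠ 0) :
    bGo prev xs = bGo 0 (xs.dropWhile (· ≠ 0)) := by
  induction xs generalizing prev with
  | nil => simp [bGo]
  | cons x xs ih =>
      by_cases hx : x = 0
      · subst hx; simp [bGo]
      · simp [bGo, h, hx, ih x hx]

theorem pv_getD (xs : List Int) (j : Nat) (h : j < xs.length) :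
    PySem.List.pyGetD xs (j : Int) 0 = xs[j] := by
  simp [PySem.List.pyGetD_natCast, List.getD_eq_getElem?_getD, List.getElem?_eq_getElem h]

theorem pv_takeWhile_length_le (p : Int → Bool) (xs : List Int) : (xs.takeWhile p).length ≤ xs.length :=
  (List.takeWhile_prefix p).length_le

theorem pv_dropWhile_eq_drop (p : Int → Bool) (xs : List Int) : xs.dropWhile p = xs.drop (xs.takeWhile p).length := by
  induction xs with
  | nil => rfl
  | cons x xs ih =>
      by_cases h : p x = true
      · simp [h, ih]
      · simp [h]

theorem tw_len (xs : List Int) (j : Nat) (hjl : j < xs.length) (h1 : xs[j] ≠ 0) :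
    ((xs.drop j).takeWhile (· ≠ 0)).length = 1 + ((xs.drop (j+1)).takeWhile (· ≠ 0)).length := by
  rw [List.drop_eq_getElem_cons hjl, List.takeWhile_cons]
  simp [h1]
  omega

theorem tw_zero (xs : List Int) (j : Nat) (hjl : j < xs.length) (h1 : xs[j] = 0) :
    ((xs.drop j).takeWhile (· ≠ 0)).length = 0 := by
  rw [List.drop_eq_getElem_cons hjl, List.takeWhile_cons]
  simp [h1]

-- aInner finds the first zero at or after j ('none' = no zero to the right: the early return)
theorem aInner_spec (xs : List Int) (j : Nat) (hj : j < xs.length) :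
    aInner xs j =
      (if j + ((xs.drop j).takeWhile (· ≠ 0)).length = xs.length then none
       else some (j + ((xs.drop j).takeWhile (· ≠ 0)).length)) := by
  induction j using aInner.induct xs with
  | case1 j h1 h2 =>
      have hjl := pv_getD_ne_lt xs j h1
      rw [aInner, if_pos h1, if_pos h2]
      rw [pv_getD xs j hjl] at h1
      rw [tw_len xs j hjl h1]
      have hnil : xs.drop (j+1) = [] := List.drop_eq_nil_of_le (by omega)
      rw [hnil]
      simp only [List.takeWhile_nil, List.length_nil]
      rw [if_pos (by omega)]
  | case2 j h1 h2 ih =>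
      have hjl := pv_getD_ne_lt xs j h1
      rw [aInner, if_pos h1, if_neg h2]
      rw [ih (by omega)]
      rw [pv_getD xs j hjl] at h1
      rw [tw_len xs j hjl h1]
      have e : j + 1 + ((xs.drop (j+1)).takeWhile (· ≠ 0)).length
             = j + (1 + ((xs.drop (j+1)).takeWhile (· ≠ 0)).length) := by omega
      rw [e]
  | case3 j h1 =>
      rw [aInner, if_neg h1]
      rw [pv_getD xs j hj] at h1
      have h1' : xs[j] = 0 := by simpa using h1
      rw [tw_zero xs j hj h1']
      rw [if_neg (by omega)]
      simp

theorem dropWhile_eq_drop_add (xs : List Int) (j : Nat) :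
    (xs.drop j).dropWhile (· ≠ 0) = xs.drop (j + ((xs.drop j).takeWhile (· ≠ 0)).length) := by
  rw [pv_dropWhile_eq_drop, List.drop_drop, Nat.add_comm]

theorem aOuter_spec (xs : List Int) (i : Nat) (count : Int) (target : List Int) :
    aOuter xs i count target =
      (count + ((bGo 0 (xs.drop i)).length : Int), target ++ bGo 0 (xs.drop i)) := by
  induction i, count, target using aOuter.induct xs with
  | case2 i count target hi hx tgt' cnt' j hinner ih =>
      -- xs[i] ≠ 0, aInner found the first zero at j
      have htgt : tgt' = target ++ [PySem.List.pyGetD xs (i : Int) 0] := rfl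
      have hcnt : cnt' = count + 1 := rfl
      rw [htgt, hcnt] at ih
      have hjspec := aInner_spec xs i hi
      rw [hinner] at hjspec
      split at hjspec
      · cases hjspec
      · rename_i hne
        have hj : j = i + ((xs.drop i).takeWhile (· ≠ 0)).length := by
          cases hjspec; rfl
        have hjlen : j < xs.length := by
          have := pv_takeWhile_length_le (fun x => decide (x ≠ 0)) (xs.drop i)
          simp only [List.length_drop] at this
          omega
        rw [aOuter, if_pos hi, if_pos hx, hinner]
        dsimp only
        rw [ih]
        rw [pv_getD xs i hi] at hx ⊢
        have hdropi : xs.drop i = xs[i] :: xs.drop (i + 1) := List.drop_eq_getElem_cons hi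
        have hxj : xs[j] = 0 := by
          have h1 : (xs.drop i).dropWhile (· ≠ 0) = xs.drop j := by
            rw [dropWhile_eq_drop_add, ← hj]
          have h2 : xs.drop j = xs[j] :: xs.drop (j+1) := List.drop_eq_getElem_cons hjlen
          have hne2 : (xs.drop i).dropWhile (· ≠ 0) ≠ [] := by
            rw [h1, h2]; exact List.cons_ne_nil _ _
          have h4 := List.head_dropWhile_not (p := fun x => decide (x ≠ 0)) (l := xs.drop i) hne2
          have h6 : some (((xs.drop i).dropWhile (· ≠ 0)).head hne2) = some xs[j] := by
            rw [← List.head?_eq_some_head hne2, h1, h2]; rfl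
          rw [Option.some.inj h6] at h4
          simpa using h4
        have hkey : bGo 0 (xs.drop i) = xs[i] :: bGo 0 (xs.drop (j + 1)) := by
          rw [hdropi]
          show (if xs[i] != 0 && (0:Int) == 0 then [xs[i]] else []) ++ bGo xs[i] (xs.drop (i+1))
              = xs[i] :: bGo 0 (xs.drop (j + 1))
          rw [if_pos (by simpa using hx)]
          rw [bGo_nonzero xs[i] _ hx]
          have h1 : (xs.drop (i+1)).dropWhile (· ≠ 0) = xs.drop j := by
            rw [dropWhile_eq_drop_add xs (i+1)]
            congr 1
            rw [tw_len xs i hi hx] at hj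
            omega
          rw [h1, List.drop_eq_getElem_cons hjlen, hxj]
          show [xs[i]] ++ bGo 0 ((0:Int) :: List.drop (j+1) xs) = xs[i] :: bGo 0 (List.drop (j+1) xs)
          simp [bGo]
        rw [hkey]
        simp only [List.length_cons, Prod.mk.injEq]
        constructor
        · push_cast; ring
        · simp
  | case1 i count target hi hx hinner =>
      -- xs[i] ≠ 0 and no zero to the right of it: the early return
      have hjspec := aInner_spec xs i hi
      rw [hinner] at hjspec
      split at hjspec
      · rename_i heq
        rw [aOuter, if_pos hi, if_pos hx, hinner]
        dsimp only
        rw [pv_getD xs i hi] at hx ⊢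
        have hdropi : xs.drop i = xs[i] :: xs.drop (i + 1) := List.drop_eq_getElem_cons hi
        have hkey : bGo 0 (xs.drop i) = [xs[i]] := by
          rw [hdropi]
          show (if xs[i] != 0 && (0:Int) == 0 then [xs[i]] else []) ++ bGo xs[i] (xs.drop (i+1))
              = [xs[i]]
          rw [if_pos (by simpa using hx), bGo_nonzero xs[i] _ hx]
          have h1 : (xs.drop (i+1)).dropWhile (· ≠ 0) = [] := by
            rw [dropWhile_eq_drop_add xs (i+1)]
            apply List.drop_eq_nil_of_le
            rw [tw_len xs i hi hx] at heq
            omega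
          rw [h1]; rfl
        rw [hkey]; simp
      · cases hjspec
  | case3 i count target hi hx ih =>
      -- xs[i] = 0
      rw [aOuter, if_pos hi, if_neg hx, ih]
      rw [pv_getD xs i hi] at hx
      have hx' : xs[i] = 0 := by simpa using hx
      have hdropi : xs.drop i = xs[i] :: xs.drop (i + 1) := List.drop_eq_getElem_cons hi
      have hbg : bGo 0 (xs.drop i) = bGo 0 (xs.drop (i+1)) := by
        rw [hdropi, hx']
        show (if (0:Int) != 0 && (0:Int) == 0 then [(0:Int)] else []) ++ bGo 0 (xs.drop (i+1))
            = bGo 0 (xs.drop (i + 1))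
        simp
      rw [hbg]
  | case4 i count target hi =>
      rw [aOuter, if_neg hi]
      have hnil : xs.drop i = [] := List.drop_eq_nil_of_le (by omega)
      rw [hnil]
      simp [bGo]

-- ===== VERDICT (by name: the statement is the Claim_ definition above) =====
theorem count_target_spec : Claim_equal_count_target := by
  intro out_i _
  show count_target out_i = count_target_alt out_i
  rw [count_target, aOuter_spec, count_target_alt]
  simp [bGo_eq_filter]
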